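-- pv_equiv track=rewrite | github.com/freemish/comp-sci-refresher-in-python | algos/binary_tree_traversal.py | get_binary_tree_level_order_from_inorder
-- ===== SOURCE A (Python) =====
-- from typing import Any, List, Optional, Tuple
--
-- def get_depth_and_capacity_of_left_loaded_binary_tree(items_count: int) -> Tuple[int, int]:
-- 	depth = 0
-- 	capacity_of_depth = 0
-- 	while capacity_of_depth < items_count:
-- 		capacity_of_depth += 2**depth
-- 		depth += 1
-- 	return depth, capacity_of_depth
--
-- def get_binary_tree_level_order_from_inorder(val_list: List[Any]) -> List[Any]:
-- 	"""Assumes that tree is filled from left to right."""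
--
-- 	def get_last_row():
-- 		last_row = []
-- 		depth, max_capacity = get_depth_and_capacity_of_left_loaded_binary_tree(len(val_list))
-- 		len_last_row = 2**(depth-1) if len(val_list) == max_capacity else len(val_list) - (2**(depth-1) - 1)
-- 		if len_last_row < 1:
-- 			return []
--
-- 		for i in range(len_last_row):
-- 			last_row.append(val_list[i])
-- 			val_list.pop(i)
--
-- 		return last_row
--
-- 	depth, _ = get_depth_and_capacity_of_left_loaded_binary_tree(len(val_list))
-- 	matrix = []
-- 	if len(val_list):
-- 		for _ in range(depth):
-- 			last_row = get_last_row()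
-- 			matrix.append(last_row)
--
-- 	matrix = matrix[::-1]
-- 	loadorder_list = []
-- 	for row in matrix:
-- 		loadorder_list += row
-- 	return loadorder_list
-- ===== SOURCE B (Python) =====
-- def get_binary_tree_level_order_from_inorder(val_list):
--     """Assumes that tree is filled from left to right."""
--     n = len(val_list)
--     if n == 0:
--         return []
--     L = n.bit_length() - 1          # depth of the last level (root = level 0)
--     k = n - (2 ** L - 1)            # number of nodes on the last level
--     out = []
--     for h in range(1, n + 1):       # heap indices in level order
--         lev = h.bit_length() - 1
--         q = (2 * (h - 2 ** lev) + 1) * 2 ** (L - lev) - 1   # inorder position in the perfect tree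
--         p = q if q < 2 * k else (q - 1) // 2 + k            # adjust for the truncated last level
--         out.append(val_list[p])
--     return out
-- ===== Notes on version B (the rewrite author's own statement) =====
-- stated objective: faster
-- what changed: Replaces the quadratic bottom-up row extraction (repeatedly popping every other element out of the list) by a one-pass direct index remapping: for each heap index h the inorder position of that node is computed arithmetically from bit lengths, so the output is built in a single loop without mutating the input.
import Mathlib
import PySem

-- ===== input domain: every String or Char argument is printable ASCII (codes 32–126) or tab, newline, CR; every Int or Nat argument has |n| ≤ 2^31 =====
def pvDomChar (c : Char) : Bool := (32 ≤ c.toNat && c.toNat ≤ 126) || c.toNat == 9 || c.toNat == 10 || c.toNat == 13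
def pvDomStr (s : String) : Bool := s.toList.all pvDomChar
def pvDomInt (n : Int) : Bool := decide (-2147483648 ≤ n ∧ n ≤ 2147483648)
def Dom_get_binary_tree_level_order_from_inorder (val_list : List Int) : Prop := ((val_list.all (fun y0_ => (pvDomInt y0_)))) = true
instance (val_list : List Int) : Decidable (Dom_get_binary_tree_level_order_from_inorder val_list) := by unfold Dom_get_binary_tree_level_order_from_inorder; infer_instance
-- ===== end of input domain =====

-- B replaces A's quadratic bottom-up row extraction by a one-pass arithmetic index remapping
-- (heap index -> inorder position via bit lengths); equivalence is about the RETURN value only: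
-- the Python A empties its argument list in place, B does not mutate it.


-- ===== PORT A =====
-- while capacity_of_depth < items_count: capacity_of_depth += 2**depth; depth += 1
def pvDepthLoop (items_count depth capacity : Int) : Int × Int :=
  if capacity < items_count then
    pvDepthLoop items_count (depth + 1) (capacity + 2 ^ depth.toNat)
  else (depth, capacity)
termination_by (items_count - capacity).toNat
decreasing_by
  have h1 : (1:Int) ≤ 2 ^ depth.toNat := one_le_pow₀ (by norm_num)
  omega

def pvGetDepthAndCapacity (items_count : Int) : Int × Int := pvDepthLoop items_count 0 0

-- last_row.append(val_list[i]); val_list.pop(i)   (list.pop(i) returns exactly val_list[i])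
def pvPopStep (st : List Int × List Int) (i : Nat) : List Int × List Int :=
  match PySem.List.pop? st.2 (i : Int) with
  | some p => (st.1 ++ [p.1], p.2)
  | none => (st.1, st.2)   -- unreachable: here i is always a valid index

-- get_last_row(); Python computes the float 2**(-1) only when the list is empty, where the
-- `< 1` guard returns [] without popping; this port returns ([], lst) there as well.
def pvGetLastRow (lst : List Int) : List Int × List Int :=
  let dc := pvGetDepthAndCapacity (lst.length : Int)
  let len_last_row : Int :=
    if (lst.length : Int) = dc.2 then 2 ^ (dc.1 - 1).toNat
    else (lst.length : Int) - (2 ^ (dc.1 - 1).toNat - 1)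
  if len_last_row < 1 then ([], lst)
  else (List.range len_last_row.toNat).foldl pvPopStep ([], lst)

-- for _ in range(depth): last_row = get_last_row(); matrix.append(last_row)
def pvRowsLoop : Nat → List (List Int) × List Int → List (List Int) × List Int
  | 0, st => st
  | d+1, st =>
    let rr := pvGetLastRow st.2
    pvRowsLoop d (st.1 ++ [rr.1], rr.2)

def get_binary_tree_level_order_from_inorder (val_list : List Int) : List Int :=
  let depth := (pvGetDepthAndCapacity (val_list.length : Int)).1
  let matrix : List (List Int) :=
    if val_list.length ≠ 0 then (pvRowsLoop depth.toNat ([], val_list)).1 else []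
  -- matrix = matrix[::-1]; for row in matrix: loadorder_list += row
  (matrix.reverse).foldl (fun acc row => acc ++ row) []

-- ===== PORT B =====
def get_binary_tree_level_order_from_inorder_alt (val_list : List Int) : List Int :=
  let n := val_list.length
  if n = 0 then []
  else
    let L := PySem.Int.bitLength (n : Int) - 1
    let k := n - (2 ^ L - 1)
    (List.range' 1 n).map (fun (h : Nat) =>
      let lev := PySem.Int.bitLength (h : Int) - 1
      let q := (2 * (h - 2 ^ lev) + 1) * 2 ^ (L - lev) - 1
      let p := if q < 2 * k then q else (q - 1) / 2 + k
      val_list.getD p 0)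

-- ===== PRECONDITION & SPEC =====
def Spec_get_binary_tree_level_order_from_inorder (val_list : List Int) (out : List Int) : Prop := out = get_binary_tree_level_order_from_inorder_alt val_list
instance (val_list : List Int) (out : List Int) : Decidable (Spec_get_binary_tree_level_order_from_inorder val_list out) := by unfold Spec_get_binary_tree_level_order_from_inorder; infer_instance

-- ===== CLAIM (what is proved, stated in full; the proofs are below) =====
def Claim_equal_get_binary_tree_level_order_from_inorder : Prop := ∀ (val_list : List Int), Dom_get_binary_tree_level_order_from_inorder val_list → Spec_get_binary_tree_level_order_from_inorder val_list (get_binary_tree_level_order_from_inorder val_list)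

-- ===== LEMMAS AND PROOFS =====

-- k(n) = number of nodes on the last level of the left-filled tree with n nodes
def pvK (n : Nat) : Nat := n - (2 ^ (Nat.size n - 1) - 1)

-- the bottom row A extracts: elements at inorder positions 0, 2, …, 2k-2
def pvEvens (l : List Int) : List Int :=
  (List.range (pvK l.length)).map (fun t => l.getD (2*t) 0)

-- what remains of the list after A's popping loop
def pvRest (l : List Int) : List Int :=
  (List.range (min (pvK l.length) (l.length - pvK l.length))).map (fun t => l.getD (2*t+1) 0)
    ++ l.drop (2 * pvK l.length)

lemma pv_bitLength_eq_size (m : Nat) : PySem.Int.bitLength (m : Int) = Nat.size m := by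
  rcases Nat.eq_zero_or_pos m with hm | hm
  · subst hm; simp [PySem.Int.bitLength_zero]
  · have h1 := PySem.Int.lt_two_pow_bitLength (m : Int)
    have h2 := PySem.Int.two_pow_bitLength_le (m : Int) (by exact_mod_cast hm.ne')
    simp only [Int.natAbs_natCast] at h1 h2
    set b := PySem.Int.bitLength (m : Int) with hb
    have hb1 : 1 ≤ b := by
      by_contra h
      have : b = 0 := by omega
      rw [this] at h1; simp at h1; omega
    have hle : Nat.size m ≤ b := Nat.size_le.mpr h1
    have hge : b - 1 < Nat.size m := Nat.lt_size.mpr h2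
    omega

lemma pv_size_two_pow_sub_one (L : Nat) : Nat.size (2 ^ L - 1) = L := by
  rcases Nat.eq_zero_or_pos L with hL | hL
  · subst hL; simp
  · have hp : 1 ≤ 2 ^ (L - 1) := Nat.one_le_two_pow
    have hpL : 2 ^ L = 2 * 2 ^ (L - 1) := by
      conv_lhs => rw [show L = (L-1)+1 by omega]
      ring
    have hle : Nat.size (2 ^ L - 1) ≤ L := Nat.size_le.mpr (by omega)
    have hge : L - 1 < Nat.size (2 ^ L - 1) := Nat.lt_size.mpr (by omega)
    omega

lemma pvK_bounds (n : Nat) (h : 1 ≤ n) :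
    1 ≤ pvK n ∧ pvK n ≤ 2 ^ (Nat.size n - 1) ∧ n - pvK n = 2 ^ (Nat.size n - 1) - 1 ∧
      2 * pvK n ≤ n + 1 := by
  have hs1 : 1 ≤ Nat.size n := Nat.lt_size.mpr (by simpa using h)
  have hlow : 2 ^ (Nat.size n - 1) ≤ n := Nat.lt_size.mp (by omega)
  have hup : n < 2 ^ Nat.size n := Nat.lt_size_self n
  have hpL : 2 ^ Nat.size n = 2 * 2 ^ (Nat.size n - 1) := by
    conv_lhs => rw [show Nat.size n = (Nat.size n - 1)+1 by omega]
    ring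
  unfold pvK
  omega

lemma pvDepthLoop_spec (n : Nat) : ∀ (f d : Nat), Nat.size n - d ≤ f → d ≤ Nat.size n →
    pvDepthLoop (n : Int) (d : Int) ((2:Int)^d - 1) = ((Nat.size n : Int), (2:Int)^(Nat.size n) - 1) := by
  intro f
  induction f with
  | zero =>
    intro d hf hd
    have hdd : d = Nat.size n := by omega
    subst hdd
    rw [pvDepthLoop]
    have hn : n < 2 ^ Nat.size n := Nat.lt_size_self n
    have hcast : ((2:Int) ^ Nat.size n - 1 < (n:Int)) = False := by
      simp only [eq_iff_iff, iff_false, not_lt]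
      have : ((2^Nat.size n : Nat) : Int) = (2:Int)^Nat.size n := by push_cast; ring
      omega
    simp [hcast]
  | succ f ih =>
    intro d hf hd
    rw [pvDepthLoop]
    by_cases hlt : (2:Int)^d - 1 < (n:Int)
    · have htn : ((d:Int)).toNat = d := Int.toNat_natCast d
      have hstep : (2:Int)^d - 1 + 2 ^ ((d:Int)).toNat = 2^(d+1) - 1 := by
        rw [htn]; ring
      have hd' : d < Nat.size n := by
        rw [Nat.lt_size]
        have : ((2^d : Nat) : Int) = (2:Int)^d := by push_cast; ring
        omega
      rw [if_pos hlt, hstep]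
      have := ih (d+1) (by omega) (by omega)
      simpa using this
    · rw [if_neg hlt]
      have hd' : ¬ d < Nat.size n := by
        intro hc
        have h2 : 2^d ≤ n := Nat.lt_size.mp hc
        have : ((2^d : Nat) : Int) = (2:Int)^d := by push_cast; ring
        omega
      have : d = Nat.size n := by omega
      subst this; rfl

lemma pvGetDepthAndCapacity_spec (n : Nat) :
    pvGetDepthAndCapacity (n : Int) = ((Nat.size n : Int), (2:Int)^(Nat.size n) - 1) := by
  have := pvDepthLoop_spec n (Nat.size n) 0 (by omega) (by omega)
  simpa [pvGetDepthAndCapacity] using this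

lemma pvPopFold_inv (l : List Int) : ∀ (j : Nat), 2*j ≤ l.length + 1 →
    (List.range j).foldl pvPopStep ([], l) =
      ((List.range j).map (fun t => l.getD (2*t) 0),
       (List.range (min j (l.length - j))).map (fun t => l.getD (2*t+1) 0) ++ l.drop (2*j)) := by
  intro j
  induction j with
  | zero => simp
  | succ j ih =>
    intro hj
    have h2j : 2*j < l.length := by omega
    have hmin : min j (l.length - j) = j := by omega
    rw [List.range_succ, List.foldl_append, ih (by omega)]
    simp only [List.foldl_cons, List.foldl_nil, hmin]
    have hlenmap : ((List.range j).map (fun t => l.getD (2*t+1) 0)).length = j := by simp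
    have hRlen : (((List.range j).map (fun t => l.getD (2*t+1) 0)) ++ l.drop (2*j)).length = l.length - j := by
      simp; omega
    rw [pvPopStep]
    simp only [PySem.List.pop?, hRlen]
    have hidx : PySem.List.pyIdx? (l.length - j) (j : Int) = some j := by
      simp [PySem.List.pyIdx?]; omega
    rw [hidx]
    simp only [Option.bind_some]
    have hget : (((List.range j).map (fun t => l.getD (2*t+1) 0)) ++ l.drop (2*j))[j]? = some l[2*j] := by
      rw [List.getElem?_append_right (by simp)]
      simp only [hlenmap, Nat.sub_self]
      rw [List.getElem?_drop]
      simp [List.getElem?_eq_getElem h2j]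
    rw [hget]
    simp only [Option.map_some]
    have herase : (((List.range j).map (fun t => l.getD (2*t+1) 0)) ++ l.drop (2*j)).eraseIdx j =
        ((List.range j).map (fun t => l.getD (2*t+1) 0)) ++ l.drop (2*j+1) := by
      rw [List.eraseIdx_append_of_length_le (by omega)]
      congr 1
      rw [hlenmap, Nat.sub_self, List.eraseIdx_zero, List.tail_drop]
    rw [herase]
    simp only [Prod.mk.injEq]
    constructor
    · simp [List.getD_eq_getElem?_getD, List.getElem?_eq_getElem h2j]
    · by_cases hb : 2*j+1 < l.length
      · have hmin2 : min (j+1) (l.length - (j+1)) = j + 1 := by omega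
        rw [hmin2, List.range_succ, List.map_append, List.drop_eq_getElem_cons hb]
        simp [List.getD_eq_getElem?_getD, List.getElem?_eq_getElem hb, show 2*(j+1) = 2*j+1+1 by ring]
      · have hlen : l.length = 2*j+1 := by omega
        have hmin2 : min (j+1) (l.length - (j+1)) = j := by omega
        rw [hmin2]
        rw [List.drop_eq_nil_of_le (by omega), List.drop_eq_nil_of_le (by omega)]

lemma pv_getD_map_range (g : Nat → Int) (M t : Nat) (h : t < M) :
    ((List.range M).map g).getD t 0 = g t := by
  rw [List.getD_eq_getElem?_getD, List.getElem?_map]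
  simp [List.getElem?_range h]

lemma pv_getD_drop (l : List Int) (a i : Nat) (_ : a + i < l.length) :
    (l.drop a).getD i 0 = l.getD (a+i) 0 := by
  rw [List.getD_eq_getElem?_getD, List.getElem?_drop, ← List.getD_eq_getElem?_getD]

lemma pv_size_eq (h L : Nat) (h1 : 2^L ≤ h) (h2 : h < 2^(L+1)) : Nat.size h = L + 1 := by
  have ha : Nat.size h ≤ L + 1 := Nat.size_le.mpr h2
  have hb : L < Nat.size h := Nat.lt_size.mpr h1
  omega

lemma pvGetLastRow_spec (l : List Int) (h : 1 ≤ l.length) :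
    pvGetLastRow l = (pvEvens l, pvRest l) := by
  obtain ⟨hk1, hk2, hk3, hk4⟩ := pvK_bounds l.length h
  have hs1 : 1 ≤ Nat.size l.length := Nat.lt_size.mpr (by simpa using h)
  have hlow : 2 ^ (Nat.size l.length - 1) ≤ l.length := Nat.lt_size.mp (by omega)
  have hup : l.length < 2 ^ Nat.size l.length := Nat.lt_size_self _
  have hpL : 2 ^ Nat.size l.length = 2 * 2 ^ (Nat.size l.length - 1) := by
    conv_lhs => rw [show Nat.size l.length = (Nat.size l.length - 1)+1 by omega]
    ring
  unfold pvGetLastRow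
  rw [pvGetDepthAndCapacity_spec]
  have htoNat : (((Nat.size l.length : Int)) - 1).toNat = Nat.size l.length - 1 := by omega
  simp only [htoNat]
  have hcs : ((2:Int))^(Nat.size l.length) = ((2^(Nat.size l.length) : Nat) : Int) := by push_cast; ring
  have hcs1 : ((2:Int))^(Nat.size l.length - 1) = ((2^(Nat.size l.length - 1) : Nat) : Int) := by push_cast; ring
  have hllr : (if (l.length : Int) = 2^(Nat.size l.length) - 1 then ((2:Int) ^ (Nat.size l.length - 1))
      else (l.length : Int) - (2^(Nat.size l.length - 1) - 1)) = (pvK l.length : Int) := by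
    unfold pvK
    split_ifs with hfull <;> omega
  rw [hllr]
  have hnotlt : ¬ ((pvK l.length : Int) < 1) := by omega
  rw [if_neg hnotlt]
  have htn : ((pvK l.length : Int)).toNat = pvK l.length := Int.toNat_natCast _
  rw [htn, pvPopFold_inv l (pvK l.length) (by omega)]
  rfl

lemma pvRest_length (l : List Int) (h : 1 ≤ l.length) :
    (pvRest l).length = l.length - pvK l.length := by
  obtain ⟨hk1, hk2, hk3, hk4⟩ := pvK_bounds l.length h
  simp only [pvRest, List.length_append, List.length_map, List.length_range, List.length_drop]
  omega

lemma pvRowsLoop_acc (d : Nat) (acc : List (List Int)) (x : List Int) :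
    pvRowsLoop d (acc, x) = (acc ++ (pvRowsLoop d ([], x)).1, (pvRowsLoop d ([], x)).2) := by
  induction d generalizing acc x with
  | zero => simp [pvRowsLoop]
  | succ d ih =>
    simp only [pvRowsLoop, List.nil_append]
    rw [ih (acc ++ [(pvGetLastRow x).1]), ih [(pvGetLastRow x).1]]
    simp

lemma pvA_nil : get_binary_tree_level_order_from_inorder [] = [] := by
  unfold get_binary_tree_level_order_from_inorder
  simp

lemma pvA_rec (l : List Int) (h : 1 ≤ l.length) :
    get_binary_tree_level_order_from_inorder l =
      get_binary_tree_level_order_from_inorder (pvRest l) ++ pvEvens l := by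
  obtain ⟨hk1, hk2, hk3, hk4⟩ := pvK_bounds l.length h
  have hs1 : 1 ≤ Nat.size l.length := Nat.lt_size.mpr (by simpa using h)
  have hne : l.length ≠ 0 := by omega
  have hrl := pvRest_length l h
  have htn : ((Nat.size l.length : Int)).toNat = Nat.size l.length := Int.toNat_natCast _
  have hLHS : get_binary_tree_level_order_from_inorder l =
      (((pvRowsLoop (Nat.size l.length - 1) ([], pvRest l)).1).reverse).foldl
        (fun acc row => acc ++ row) [] ++ pvEvens l := by
    conv_lhs => rw [get_binary_tree_level_order_from_inorder]
    simp only [pvGetDepthAndCapacity_spec l.length, htn, if_pos hne]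
    rw [show Nat.size l.length = (Nat.size l.length - 1) + 1 by omega]
    simp only [pvRowsLoop, List.nil_append]
    rw [pvGetLastRow_spec l h]
    rw [pvRowsLoop_acc (Nat.size l.length - 1) [pvEvens l] (pvRest l)]
    simp only [List.reverse_append, List.reverse_cons, List.reverse_nil, List.nil_append,
      List.foldl_append, List.foldl_cons, List.foldl_nil, Nat.add_sub_cancel]
  rw [hLHS]
  rcases Nat.eq_zero_or_pos (l.length - pvK l.length) with hm | hm
  · have hrest_nil : pvRest l = [] := List.eq_nil_of_length_eq_zero (by omega)
    have hs_eq : Nat.size l.length - 1 = 0 := by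
      have hp : 1 ≤ 2 ^ (Nat.size l.length - 1) := Nat.one_le_two_pow
      rcases Nat.eq_zero_or_pos (Nat.size l.length - 1) with h0 | h0
      · exact h0
      · exfalso
        have : 2 ≤ 2 ^ (Nat.size l.length - 1) := by
          calc 2 = 2^1 := by norm_num
          _ ≤ 2 ^ (Nat.size l.length - 1) := Nat.pow_le_pow_right (by norm_num) h0
        omega
    rw [hrest_nil, hs_eq, pvA_nil]
    simp [pvRowsLoop]
  · have hsize_m : Nat.size (l.length - pvK l.length) = Nat.size l.length - 1 := by
      rw [hk3, pv_size_two_pow_sub_one]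
    have hne' : (pvRest l).length ≠ 0 := by omega
    conv_rhs => rw [get_binary_tree_level_order_from_inorder]
    simp only [hrl, hsize_m, pvGetDepthAndCapacity_spec (l.length - pvK l.length),
      Int.toNat_natCast]
    rw [if_pos (show l.length - pvK l.length ≠ 0 by omega)]

lemma pvK_two_pow_sub_one (L : Nat) (hL : 1 ≤ L) : pvK (2^L - 1) = 2^(L-1) := by
  have hpL : 2 ^ L = 2 * 2 ^ (L - 1) := by
    conv_lhs => rw [show L = (L-1)+1 by omega]
    ring
  have hp : 1 ≤ 2 ^ (L - 1) := Nat.one_le_two_pow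
  unfold pvK
  rw [pv_size_two_pow_sub_one]
  omega

lemma pvB_eval (l : List Int) (h : 1 ≤ l.length) :
    get_binary_tree_level_order_from_inorder_alt l =
      (List.range' 1 l.length).map (fun (hh : Nat) =>
        (fun q => if q < 2 * pvK l.length then l.getD q 0 else l.getD ((q - 1) / 2 + pvK l.length) 0)
          ((2 * (hh - 2 ^ (Nat.size hh - 1)) + 1) * 2 ^ ((Nat.size l.length - 1) - (Nat.size hh - 1)) - 1)) := by
  conv_lhs => rw [get_binary_tree_level_order_from_inorder_alt]
  rw [if_neg (by omega)]
  apply List.map_congr_left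
  intro hh _
  simp only [pv_bitLength_eq_size, pvK]
  rw [apply_ite (fun p => l.getD p 0)]

lemma pvB_rec (l : List Int) (h : 1 ≤ l.length) :
    get_binary_tree_level_order_from_inorder_alt l =
      get_binary_tree_level_order_from_inorder_alt (pvRest l) ++ pvEvens l := by
  obtain ⟨hk1, hk2, hk3, hk4⟩ := pvK_bounds l.length h
  have hs1 : 1 ≤ Nat.size l.length := Nat.lt_size.mpr (by simpa using h)
  have hlow : 2 ^ (Nat.size l.length - 1) ≤ l.length := Nat.lt_size.mp (by omega)
  have hup : l.length < 2 ^ Nat.size l.length := Nat.lt_size_self _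
  have hpL : 2 ^ Nat.size l.length = 2 * 2 ^ (Nat.size l.length - 1) := by
    conv_lhs => rw [show Nat.size l.length = (Nat.size l.length - 1)+1 by omega]
    ring
  have hrl := pvRest_length l h
  rw [pvB_eval l h]
  have hsplit : List.range' 1 l.length =
      List.range' 1 (l.length - pvK l.length) ++ List.range' (1 + (l.length - pvK l.length)) (pvK l.length) := by
    rw [List.range'_append_1]
    congr 1
    omega
  rw [hsplit, List.map_append]
  have hevens : (List.range' (1 + (l.length - pvK l.length)) (pvK l.length)).map
      (fun (hh : Nat) =>
        (fun q => if q < 2 * pvK l.length then l.getD q 0 else l.getD ((q - 1) / 2 + pvK l.length) 0)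
          ((2 * (hh - 2 ^ (Nat.size hh - 1)) + 1) * 2 ^ ((Nat.size l.length - 1) - (Nat.size hh - 1)) - 1)) =
      pvEvens l := by
    have h1m : 1 + (l.length - pvK l.length) = 2 ^ (Nat.size l.length - 1) := by omega
    rw [h1m, List.range'_eq_map_range, List.map_map]
    unfold pvEvens
    apply List.map_congr_left
    intro t ht
    rw [List.mem_range] at ht
    have hsz : Nat.size (2 ^ (Nat.size l.length - 1) + t) = (Nat.size l.length - 1) + 1 := by
      apply pv_size_eq
      · omega
      · have : 2 ^ ((Nat.size l.length - 1) + 1) = 2 * 2 ^ (Nat.size l.length - 1) := by ring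
        omega
    simp only [Function.comp_apply, hsz, Nat.add_sub_cancel]
    rw [Nat.add_sub_cancel_left, Nat.sub_self, pow_zero, mul_one]
    rw [if_pos (by omega)]
    norm_num
  rw [hevens]
  congr 1
  -- the upper part of the tree
  rcases Nat.eq_zero_or_pos (l.length - pvK l.length) with hm | hm
  · have hrest_nil : pvRest l = [] := List.eq_nil_of_length_eq_zero (by omega)
    rw [hm, hrest_nil]
    simp [get_binary_tree_level_order_from_inorder_alt]
  · -- m ≥ 1; the remaining list is the inorder of the perfect tree with m = 2^(L) - 1 nodes
    have hL1 : 1 ≤ Nat.size l.length - 1 := by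
      rcases Nat.eq_zero_or_pos (Nat.size l.length - 1) with h0 | h0
      · exfalso; rw [h0] at hk3; simp at hk3; omega
      · exact h0
    have hsize_m : Nat.size (l.length - pvK l.length) = Nat.size l.length - 1 := by
      rw [hk3, pv_size_two_pow_sub_one]
    have hKm : pvK (l.length - pvK l.length) = 2 ^ (Nat.size l.length - 1 - 1) := by
      rw [hk3, pvK_two_pow_sub_one _ hL1]
    have hpL1 : 2 ^ (Nat.size l.length - 1) = 2 * 2 ^ (Nat.size l.length - 1 - 1) := by
      conv_lhs => rw [show Nat.size l.length - 1 = (Nat.size l.length - 1 - 1)+1 by omega]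
      ring
    rw [pvB_eval (pvRest l) (by omega), hrl, hsize_m, hKm]
    apply List.map_congr_left
    intro hh hmem
    rw [List.mem_range'_1] at hmem
    obtain ⟨hh1, hh2⟩ := hmem
    -- abbreviations
    have hhs1 : 1 ≤ Nat.size hh := Nat.lt_size.mpr (by simpa using hh1)
    have hhlow : 2 ^ (Nat.size hh - 1) ≤ hh := Nat.lt_size.mp (by omega)
    have hhup : hh < 2 ^ Nat.size hh := Nat.lt_size_self _
    have hhpL : 2 ^ Nat.size hh = 2 * 2 ^ (Nat.size hh - 1) := by
      conv_lhs => rw [show Nat.size hh = (Nat.size hh - 1)+1 by omega]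
      ring
    have hlev : Nat.size hh - 1 ≤ Nat.size l.length - 1 - 1 := by
      have hhlt : hh < 2 ^ (Nat.size l.length - 1) := by omega
      have hsle : Nat.size hh ≤ Nat.size l.length - 1 := Nat.size_le.mpr (by omega)
      omega
    beta_reduce
    set lev := Nat.size hh - 1 with hlevdef
    set L := Nat.size l.length - 1 with hLdef
    have hE : L - lev = (L - 1 - lev) + 1 := by omega
    set P := 2 ^ (L - 1 - lev) with hPdef
    have hP1 : 1 ≤ P := Nat.one_le_two_pow
    have h2E : 2 ^ (L - lev) = 2 * P := by rw [hE, hPdef]; ring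
    set odd := 2 * (hh - 2 ^ lev) + 1 with hodddef
    have hodd1 : 1 ≤ odd := by omega
    have hoddP1 : 1 ≤ odd * P := Nat.one_le_iff_ne_zero.mpr (by positivity)
    have hoddub : odd ≤ 2 * 2 ^ lev - 1 := by omega
    have hoddb : odd * P ≤ 2 ^ L - P := by
      calc odd * P ≤ (2 * 2 ^ lev - 1) * P := Nat.mul_le_mul_right _ hoddub
      _ = 2 * 2 ^ lev * P - P := by rw [Nat.sub_mul, one_mul]
      _ = 2 ^ L - P := by
          congr 1
          rw [show 2 * 2 ^ lev = 2 ^ (lev + 1) by ring, ← pow_add]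
          congr 1
          omega
    rw [h2E]
    set Q' := odd * P - 1 with hQ'def
    have hmm : odd * (2 * P) = 2 * (odd * P) := by ring
    have hQ : odd * (2 * P) - 1 = 2 * Q' + 1 := by omega
    rw [hQ]
    have h2L : 2 ^ L = 2 * 2 ^ (L - 1) := hpL1
    have hQ'b : Q' ≤ 2 ^ L - 2 := by omega
    have hm2 : l.length - pvK l.length = 2 ^ L - 1 := hk3
    rw [if_pos (show Q' < 2 * 2 ^ (L - 1) by omega)]
    have hminK : min (pvK l.length) (l.length - pvK l.length) = min (pvK l.length) (2 ^ L - 1) := by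
      rw [hm2]
    by_cases hc : Q' < pvK l.length
    · rw [if_pos (show 2 * Q' + 1 < 2 * pvK l.length by omega)]
      unfold pvRest
      rw [List.getD_append _ _ 0 Q' (by
        simp only [List.length_map, List.length_range]
        omega)]
      rw [pv_getD_map_range _ _ _ (by omega)]
    · rw [if_neg (show ¬ (2 * Q' + 1 < 2 * pvK l.length) by omega)]
      have hdiv : (2 * Q' + 1 - 1) / 2 = Q' := by omega
      rw [hdiv]
      unfold pvRest
      rw [List.getD_append_right _ _ 0 Q' (by
        simp only [List.length_map, List.length_range]
        omega)]
      simp only [List.length_map, List.length_range]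
      have hminKK : min (pvK l.length) (l.length - pvK l.length) = pvK l.length := by omega
      rw [hminKK]
      rw [pv_getD_drop l _ _ (by omega)]
      congr 1
      omega
  
  

lemma pv_main (l : List Int) :
    get_binary_tree_level_order_from_inorder l = get_binary_tree_level_order_from_inorder_alt l := by
  suffices H : ∀ (n : Nat) (l : List Int), l.length = n →
      get_binary_tree_level_order_from_inorder l = get_binary_tree_level_order_from_inorder_alt l from
    H l.length l rfl
  intro n
  induction n using Nat.strong_induction_on with
  | _ n ih =>
    intro l hl
    rcases Nat.eq_zero_or_pos n with h0 | h0
    · have : l = [] := List.length_eq_zero_iff.mp (by omega)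
      subst this
      rw [pvA_nil]
      simp [get_binary_tree_level_order_from_inorder_alt]
    · have h1 : 1 ≤ l.length := by omega
      obtain ⟨hk1, _, _, _⟩ := pvK_bounds l.length h1
      rw [pvA_rec l h1, pvB_rec l h1,
        ih (pvRest l).length (by rw [pvRest_length l h1]; omega) (pvRest l) rfl]

-- ===== VERDICT (by name: the statement is the Claim_ definition above) =====
theorem get_binary_tree_level_order_from_inorder_spec : Claim_equal_get_binary_tree_level_order_from_inorder := by
  intro l _
  exact pv_main l
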